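-- pv_equiv track=rewrite | github.com/henrinikku/tira2021 | viikko8/cover.py | count
-- ===== SOURCE A (Python) =====
-- from collections import namedtuple
-- from typing import List
-- from string import ascii_uppercase
--
-- Point = namedtuple("Point", ["y", "x"])
--
-- Matrix = List[List[str]]
--
-- def fill_matrix(
--     n: int, m: int, y: int, x: int, point: Point, fill: str, matrix: Matrix
-- ):
--     return [
--         [
--             matrix[row][col]
--             or (
--                 fill
--                 if (
--                     point.x <= col
--                     and point.y <= row
--                     and point.x + x >= col
--                     and point.y + y >= row
--                 )
--                 else ""
--             )
--             for col in range(m)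
--         ]
--         for row in range(n)
--     ]
--
-- def count(n: int, m: int, k: int):
--     out = [0]
--     alphabet = "".join(reversed(ascii_uppercase[:k]))
--     initial_matrix = [["" for col in range(m)] for row in range(n)]
--
--     def search(n: int, m: int, k: int, matrix: Matrix):
--         # Get the top-leftmost empty point
--         point = next(
--             (
--                 Point(row, col)
--                 for row in range(n)
--                 for col in range(m)
--                 if not matrix[row][col]
--             ),
--             None,
--         )
--
--         if point is None:
--             out[0] += 1
--             return
--
--         if k == 0:
--             return
--
--         # Try all rectangles starting from point
--         end_y = n - point.y
--         end_x = m - point.x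
--         for y in range(end_y):
--             for x in range(end_x):
--                 if matrix[y + point.y][x + point.x]:
--                     end_x = x
--                     break
--
--                 filled = fill_matrix(n, m, y, x, point, alphabet[k - 1], matrix)
--                 search(n, m, k - 1, filled)
--
--     search(n, m, k, initial_matrix)
--     return out[0]
-- ===== SOURCE B (Python) =====
-- def count(n: int, m: int, k: int):
--     # Column-height (skyline) state instead of rebuilding a full labelled matrix:
--     # a cell (row, col) is covered iff row < h[col]. The anchor (first empty cell
--     # in row-major order) is (min(h), first argmin); a rectangle of height dy and
--     # width dx placed there just raises those dx heights to min(h) + dy.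
--     if n <= 0 or m <= 0:
--         return 1
--
--     def search(k, h):
--         r = min(h)
--         if r == n:
--             return 1
--         if k <= 0:
--             return 0
--         c = h.index(r)
--         w = 1
--         while c + w < m and h[c + w] == r:
--             w += 1
--         total = 0
--         for dy in range(1, n - r + 1):
--             for dx in range(1, w + 1):
--                 total += search(k - 1, h[:c] + [r + dy] * dx + h[c + dx:])
--         return total
--
--     return search(k, [0] * m)
-- ===== Notes on version B (the rewrite author's own statement) =====
-- stated objective: faster
-- what changed: Replaces the per-node full n*m labelled-matrix rebuild with a length-m column-height (skyline) array: the anchor is (min h, first argmin), the width bound is the run of minimal columns, and placing a rectangle just raises dx heights, so each node costs O(m) instead of O(n*m) and no string matrix exists.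
-- intended difference: For negative k on grids small enough that Python's negative indexing into the shrunken alphabet stays in range (1<=n, 1<=m, k<0, n*m <= 26+2k), A ignores the rectangle budget and returns the total number of rectangle partitions via negative-index wraparound, while B returns 0, the intended count of tilings using at most k<0 rectangles. — e.g. on count(2, 2, -1): A returns 8, B returns 0
import Mathlib
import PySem

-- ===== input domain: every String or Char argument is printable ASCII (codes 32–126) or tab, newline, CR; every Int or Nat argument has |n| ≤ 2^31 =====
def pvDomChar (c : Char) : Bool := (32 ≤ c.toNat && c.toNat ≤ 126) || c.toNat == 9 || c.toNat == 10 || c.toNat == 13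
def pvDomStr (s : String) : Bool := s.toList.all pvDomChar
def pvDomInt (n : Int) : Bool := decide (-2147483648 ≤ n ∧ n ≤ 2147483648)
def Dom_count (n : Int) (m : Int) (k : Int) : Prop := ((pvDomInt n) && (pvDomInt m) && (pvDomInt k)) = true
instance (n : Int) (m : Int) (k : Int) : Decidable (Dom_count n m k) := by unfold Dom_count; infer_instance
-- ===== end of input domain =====

-- B replaces A's per-node rebuild of the full n×m labelled string matrix by a length-m
-- column-height (skyline) array, so each search node costs O(m) instead of O(n*m);
-- the count is unchanged (labels are irrelevant to counting).

-- ===== PORT A =====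

-- "".join(reversed(ascii_uppercase[:k])) as a char list (joining 1-char strings = the reversed slice)
def pvAlph (k : Int) : List Char :=
  (PySem.List.slice "ABCDEFGHIJKLMNOPQRSTUVWXYZ".toList none (some k)).reverse

-- alphabet[k - 1]; the "?" default is never reached on Pre_: where the index is out of
-- range Python raises IndexError and those inputs are outside Pre_count
def pvFillStr (alph : List Char) (k : Int) : String :=
  match PySem.List.pyGet? alph (k - 1) with
  | some ch => String.ofList [ch]
  | none => "?"

-- matrix[row][col]; total form with defaults: A only indexes inside its n×m matrices
def pvCell (matrix : List (List String)) (row col : Int) : String :=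
  PySem.List.pyGetD (PySem.List.pyGetD matrix row []) col ""

-- fill_matrix from Source A, step for step
def pvFillMatrix (n m y x py px : Int) (fill : String) (matrix : List (List String)) :
    List (List String) :=
  (PySem.List.pyRange 0 n 1).map (fun row =>
    (PySem.List.pyRange 0 m 1).map (fun col =>
      let cur := pvCell matrix row col
      if cur ≠ "" then cur
      else if px ≤ col ∧ py ≤ row ∧ px + x ≥ col ∧ py + y ≥ row then fill else ""))

-- next((Point(row, col) for row in range(n) for col in range(m) if not matrix[row][col]), None)
def pvFirstEmpty (n m : Int) (matrix : List (List String)) : Option (Int × Int) :=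
  (PySem.List.pyRange 0 n 1).findSome? (fun row =>
    ((PySem.List.pyRange 0 m 1).find? (fun col => pvCell matrix row col == "")).map
      (fun col => (row, col)))

-- the inner 'for x in range(end_x)' loop with its break: returns (break position, sum of
-- the recursive counts accumulated before the break)
def pvXLoop (f : Int → Int) (occ : Int → Bool) : List Int → Option Int × Int
  | [] => (none, 0)
  | x :: xs =>
    if occ x then (some x, 0)
    else
      let rest := pvXLoop f occ xs
      (rest.1, f x + rest.2)

-- search from Source A; out[0] becomes the returned sum. fuel only makes the recursion
-- structural: it starts at n*m+1 and every placement fills at least one cell, so the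
-- 0-branch is never reached.
def pvSearchA (alph : List Char) (n m : Int) : Nat → Int → List (List String) → Int
  | fuel, k, matrix =>
  match pvFirstEmpty n m matrix with
  | none => 1
  | some pt =>
    if k = 0 then 0
    else
      match fuel with
      | 0 => 0
      | fuel' + 1 =>
        let fill := pvFillStr alph k
        let endY := n - pt.1
        ((PySem.List.pyRange 0 endY 1).foldl (fun st y =>
          let res := pvXLoop
            (fun x => pvSearchA alph n m fuel' (k - 1) (pvFillMatrix n m y x pt.1 pt.2 fill matrix))
            (fun x => pvCell matrix (y + pt.1) (x + pt.2) != "")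
            (PySem.List.pyRange 0 st.1 1)
          (res.1.getD st.1, st.2 + res.2)) (m - pt.2, 0)).2

def count (n : Int) (m : Int) (k : Int) : Int :=
  let alph := pvAlph k
  let initial := (PySem.List.pyRange 0 n 1).map (fun _ =>
    (PySem.List.pyRange 0 m 1).map (fun _ => ""))
  pvSearchA alph n m (n.toNat * m.toNat + 1) k initial

-- ===== PORT B =====

-- search from Source B: state is the list of column heights; the remaining rectangle budget
-- max(k, 0) is carried as a Nat so that Source B's 'if k <= 0: return 0' is the 0-branch
def pvSearchB (n : Int) : Nat → List Int → Int
  | kn, h =>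
    let r := (PySem.List.min? h (fun v => v)).getD 0
    if r = n then 1
    else
      match kn with
      | 0 => 0
      | kn' + 1 =>
        let c : Nat := (PySem.List.index? h r).getD 0
        let w : Nat := 1 + ((h.drop (c + 1)).takeWhile (fun v => v == r)).length
        (PySem.List.pyRange 1 (n - r + 1) 1).foldl (fun acc dy =>
          (PySem.List.pyRange 1 ((w : Int) + 1) 1).foldl (fun acc2 dx =>
            acc2 + pvSearchB n kn' (PySem.List.slice h none (some (c : Int)) ++
              PySem.List.pyRepeat [r + dy] dx ++
              PySem.List.slice h (some ((c : Int) + dx)) none)) acc) 0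

def count_alt (n : Int) (m : Int) (k : Int) : Int :=
  if n ≤ 0 ∨ m ≤ 0 then 1
  else pvSearchB n k.toNat (List.replicate m.toNat 0)

-- ===== PRECONDITION & SPEC =====

-- Pre_count is exactly the set of inputs on which A returns: on a nonempty grid A indexes
-- its k-letter alphabet and raises IndexError when k > 26, and for k < 0 the negative
-- index stays in range only while the recursion (at most n*m placements deep) keeps
-- -(k')+1 ≤ 26+k, i.e. exactly when n*m ≤ 26 + 2*k; on an empty grid A always returns 1.
def Pre_count (n : Int) (m : Int) (k : Int) : Prop :=
  n ≤ 0 ∨ m ≤ 0 ∨ (0 ≤ k ∧ k ≤ 26) ∨ (k < 0 ∧ n * m ≤ 26 + 2 * k)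
instance (n : Int) (m : Int) (k : Int) : Decidable (Pre_count n m k) := by
  unfold Pre_count; infer_instance

def pvWitness_count : Int × Int × Int := (2, 2, 3)

-- For negative k on grids small enough that Python's negative indexing into the shrunken
-- alphabet stays in range (1 ≤ n, 1 ≤ m, k < 0, n*m ≤ 26+2k), A ignores the rectangle
-- budget and returns the total number of rectangle partitions via negative-index
-- wraparound, while B returns 0, the intended count of tilings using at most k < 0 rectangles.
def D_count (n : Int) (m : Int) (k : Int) : Prop :=
  1 ≤ n ∧ 1 ≤ m ∧ k < 0 ∧ n * m ≤ 26 + 2 * k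
instance (n : Int) (m : Int) (k : Int) : Decidable (D_count n m k) := by
  unfold D_count; infer_instance

def Spec_count (n : Int) (m : Int) (k : Int) (out : Int) : Prop :=
  ¬ D_count n m k → out = count_alt n m k
instance (n : Int) (m : Int) (k : Int) (out : Int) : Decidable (Spec_count n m k out) := by
  unfold Spec_count; infer_instance

def pvDiffWitness_count : Int × Int × Int := (2, 2, -1)
def pvDiffWitnessOut_count : Int × Int := (8, 0)


-- ===== CLAIM (what is proved, stated in full; the proofs are below) =====
def Claim_unchanged_count : Prop := ∀ (n : Int) (m : Int) (k : Int),
  Dom_count n m k → Pre_count n m k → Spec_count n m k (count n m k)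
def Claim_changed_count : Prop :=
  Dom_count (pvDiffWitness_count.1) (pvDiffWitness_count.2.1) (pvDiffWitness_count.2.2) ∧
  Pre_count (pvDiffWitness_count.1) (pvDiffWitness_count.2.1) (pvDiffWitness_count.2.2) ∧
  D_count (pvDiffWitness_count.1) (pvDiffWitness_count.2.1) (pvDiffWitness_count.2.2) ∧
  count (pvDiffWitness_count.1) (pvDiffWitness_count.2.1) (pvDiffWitness_count.2.2) = pvDiffWitnessOut_count.1 ∧
  count_alt (pvDiffWitness_count.1) (pvDiffWitness_count.2.1) (pvDiffWitness_count.2.2) = pvDiffWitnessOut_count.2 ∧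
  pvDiffWitnessOut_count.1 ≠ pvDiffWitnessOut_count.2
def Claim_exact_count : Prop := ∀ (n : Int) (m : Int) (k : Int), Dom_count n m k →
  Pre_count n m k → D_count n m k → count n m k ≠ count_alt n m k

-- ===== LEMMAS AND PROOFS =====

-- number of empty cells of the skyline h in an n-row grid
def pvE (n : Int) (h : List Int) : Nat := (h.map (fun v => (n - v).toNat)).sum

-- the matrix realises the skyline h: shape n×m, heights in [0,n], a cell nonempty
-- exactly below its column's height
def pvInv (n m : Int) (matrix : List (List String)) (h : List Int) : Prop :=
  matrix.length = n.toNat ∧ (∀ row ∈ matrix, row.length = m.toNat) ∧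
  h.length = m.toNat ∧ (∀ (i : Nat) (hi : i < h.length), 0 ≤ h[i] ∧ h[i] ≤ n) ∧
  (∀ (ri ci : Nat) (h1 : ri < matrix.length) (h2 : ci < (matrix[ri]'h1).length)
      (h3 : ci < h.length), ((matrix[ri]'h1)[ci]'h2 ≠ "" ↔ (ri : Int) < h[ci]))

-- the mid-recursion bump written with take/replicate/drop (what B's slices compute)
def pvBump (h : List Int) (c dx : Nat) (v : Int) : List Int :=
  h.take c ++ List.replicate dx v ++ h.drop (c + dx)

lemma pvBump_length (h : List Int) (c dx : Nat) (v : Int) (hcd : c + dx ≤ h.length) :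
    (pvBump h c dx v).length = h.length := by
  simp [pvBump]; omega

lemma pvBump_getElem (h : List Int) (c dx : Nat) (v : Int) (i : Nat)
    (hcd : c + dx ≤ h.length) (hi : i < h.length) :
    (pvBump h c dx v)[i]'(by rw [pvBump_length h c dx v hcd]; exact hi) =
      if c ≤ i ∧ i < c + dx then v else h[i] := by
  simp only [pvBump, List.getElem_append, List.length_append, List.length_take,
    List.length_replicate, List.getElem_take, List.getElem_replicate, List.getElem_drop]
  split_ifs <;> first
    | rfl
    | omega
    | (congr 1; omega)

lemma pvTakeWhile_stop (l : List Int) (p : Int → Bool) (h : (l.takeWhile p).length < l.length) :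
    p (l[(l.takeWhile p).length]'h) = false := by
  induction l with
  | nil => simp at h
  | cons a t ih =>
    by_cases hp : p a
    · simp [hp] at h ⊢; exact ih h
    · simp [hp]

lemma pvTakeWhile_getElem (l : List Int) (p : Int → Bool) (i : Nat)
    (hi : i < (l.takeWhile p).length) :
    l[i]'(Nat.lt_of_lt_of_le hi (List.takeWhile_prefix p).length_le) = (l.takeWhile p)[i]'hi := by
  exact (List.IsPrefix.getElem (List.takeWhile_prefix p) hi).symm

lemma pvCell_eq (matrix : List (List String)) (row col : Int) (h0 : 0 ≤ row)
    (h1 : row.toNat < matrix.length) (h2 : 0 ≤ col)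
    (h3 : col.toNat < (matrix[row.toNat]'h1).length) :
    pvCell matrix row col = (matrix[row.toNat]'h1)[col.toNat]'h3 := by
  unfold pvCell
  have hrow : PySem.List.pyGetD matrix row [] = matrix[row.toNat]'h1 :=
    PySem.List.pyGetD_eq_getElem matrix [] h0 (by omega)
  rw [hrow]
  exact PySem.List.pyGetD_eq_getElem _ "" h2 (by omega)

lemma pvXLoop_all (f : Int → Int) (occ : Int → Bool) (l : List Int)
    (h : ∀ x ∈ l, occ x = false) : pvXLoop f occ l = (none, (l.map f).sum) := by
  induction l with
  | nil => simp [pvXLoop]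
  | cons a t ih =>
    have ha := h a (by simp)
    simp only [pvXLoop, ha]
    rw [ih (fun x hx => h x (by simp [hx]))]
    simp

lemma pvXLoop_break (f : Int → Int) (occ : Int → Bool) (l1 : List Int) (x0 : Int) (l2 : List Int)
    (h1 : ∀ x ∈ l1, occ x = false) (h2 : occ x0 = true) :
    pvXLoop f occ (l1 ++ x0 :: l2) = (some x0, (l1.map f).sum) := by
  induction l1 with
  | nil => simp [pvXLoop, h2]
  | cons a t ih =>
    have ha := h1 a (by simp)
    simp only [List.cons_append, pvXLoop, ha]
    rw [ih (fun x hx => h1 x (by simp [hx]))]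
    simp

lemma pvFoldPair (step : Int × Int → Int → Int × Int) (ys : List Int) (W : Int) (g : Int → Int)
    (hstep : ∀ a y, y ∈ ys → step (W, a) y = (W, a + g y)) :
    ∀ a0, ys.foldl step (W, a0) = (W, a0 + (ys.map g).sum) := by
  induction ys with
  | nil => simp
  | cons y t ih =>
    intro a0
    rw [List.foldl_cons, hstep a0 y (by simp)]
    rw [ih (fun a y hy => hstep a y (by simp [hy])) (a0 + g y)]
    simp [add_assoc]


lemma pvCell_iff (n m : Int) (matrix : List (List String)) (h : List Int)
    (hinv : pvInv n m matrix h) (row col : Int) (h0 : 0 ≤ row) (h1 : row < n)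
    (h2 : 0 ≤ col) (h3 : col < m) (h4 : col.toNat < h.length) :
    (pvCell matrix row col ≠ "" ↔ row < h[col.toNat]'h4) := by
  obtain ⟨hml, hrowl, hhl, hhb, hcell⟩ := hinv
  have hr : row.toNat < matrix.length := by omega
  have hcl : col.toNat < (matrix[row.toNat]'hr).length := by
    rw [hrowl _ (List.getElem_mem hr)]; omega
  rw [pvCell_eq matrix row col h0 hr h2 hcl]
  have := hcell row.toNat col.toNat hr hcl h4
  rw [this]
  omega

lemma pvFE_none (n m : Int) (matrix : List (List String)) (h : List Int)
    (hinv : pvInv n m matrix h)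
    (hfull : ∀ (i : Nat) (hi : i < h.length), h[i] = n) :
    pvFirstEmpty n m matrix = none := by
  unfold pvFirstEmpty
  apply List.findSome?_eq_none_iff.mpr
  intro row hrow
  rw [PySem.List.mem_pyRange_one] at hrow
  have : (PySem.List.pyRange 0 m 1).find? (fun col => pvCell matrix row col == "") = none := by
    rw [List.find?_eq_none]
    intro col hcol
    rw [PySem.List.mem_pyRange_one] at hcol
    have h4 : col.toNat < h.length := by
      obtain ⟨_, _, hhl, _, _⟩ := hinv; omega
    have hiff := (pvCell_iff n m matrix h hinv row col hrow.1 hrow.2 hcol.1 hcol.2 h4)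
    simp only [beq_iff_eq]
    intro hc
    have hlt : row < h[col.toNat]'h4 := by rw [hfull col.toNat h4]; exact hrow.2
    exact (hiff.mpr hlt) hc
  rw [this]
  rfl

lemma pvFE_some (n m : Int) (matrix : List (List String)) (h : List Int)
    (hinv : pvInv n m matrix h) (r : Int) (c : Nat)
    (hmin : ∀ (i : Nat) (hi : i < h.length), r ≤ h[i])
    (hc : c < h.length) (hcr : h[c]'hc = r)
    (hbef : ∀ (j : Nat) (hj : j < c), h[j]'(Nat.lt_trans hj hc) ≠ r)
    (hr0 : 0 ≤ r) (hrn : r < n) :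
    pvFirstEmpty n m matrix = some (r, (c : Int)) := by
  have hhl : h.length = m.toNat := hinv.2.2.1
  have hm1 : (c : Int) < m := by omega
  unfold pvFirstEmpty
  rw [PySem.List.pyRange_one_append 0 r n hr0 (by omega), List.findSome?_append]
  have hpre : (PySem.List.pyRange 0 r 1).findSome? (fun row =>
      ((PySem.List.pyRange 0 m 1).find? (fun col => pvCell matrix row col == "")).map
        (fun col => (row, col))) = none := by
    apply List.findSome?_eq_none_iff.mpr
    intro row hrow
    rw [PySem.List.mem_pyRange_one] at hrow
    have : (PySem.List.pyRange 0 m 1).find? (fun col => pvCell matrix row col == "") = none := by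
      rw [List.find?_eq_none]
      intro col hcol
      rw [PySem.List.mem_pyRange_one] at hcol
      have h4 : col.toNat < h.length := by omega
      have hiff := pvCell_iff n m matrix h hinv row col hrow.1 (by omega) hcol.1 hcol.2 h4
      simp only [beq_iff_eq]
      intro hcc
      have : pvCell matrix row col ≠ "" := hiff.mpr (by
        have := hmin col.toNat h4; omega)
      exact this hcc
    rw [this]; rfl
  rw [hpre]
  rw [PySem.List.pyRange_one_cons hrn, List.findSome?_cons]
  have hfind : (PySem.List.pyRange 0 m 1).find? (fun col => pvCell matrix r col == "") =
      some (c : Int) := by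
    rw [PySem.List.pyRange_one_append 0 (c : Int) m (by omega) (by omega), List.find?_append]
    have hpre2 : (PySem.List.pyRange 0 (c : Int) 1).find?
        (fun col => pvCell matrix r col == "") = none := by
      rw [List.find?_eq_none]
      intro col hcol
      rw [PySem.List.mem_pyRange_one] at hcol
      have h4 : col.toNat < h.length := by omega
      have hiff := pvCell_iff n m matrix h hinv r col hr0 hrn hcol.1 (by omega) h4
      simp only [beq_iff_eq]
      intro hcc
      have hne : h[col.toNat]'h4 ≠ r := hbef col.toNat (by omega)
      have : pvCell matrix r col ≠ "" := hiff.mpr (by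
        have := hmin col.toNat h4; omega)
      exact this hcc
    have hptrue : (pvCell matrix r (c : Int) == "") = true := by
      simp only [beq_iff_eq]
      by_contra hne2
      have h4 : ((c : Int)).toNat < h.length := by omega
      have hiff := pvCell_iff n m matrix h hinv r (c : Int) hr0 hrn (by omega) hm1 h4
      have hlt := hiff.mp hne2
      simp only [Int.toNat_natCast] at hlt
      omega
    rw [hpre2]
    rw [PySem.List.pyRange_one_cons (by omega : (c : Int) < m)]
    rw [List.find?_cons_of_pos (p := fun col => pvCell matrix r col == "") hptrue]
    rfl
  rw [hfind]
  rfl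

lemma pvEBump (n : Int) (h : List Int) (r : Int) (c w : Nat)
    (hrn : r < n) (hcw : c + w ≤ h.length)
    (hrun : ∀ (j : Nat) (hj : j < w), h[c + j]'(by omega) = r)
    (y x : Nat) (hy : (y : Int) < n - r) (hx : x < w) :
    pvE n (pvBump h c (x + 1) (r + (y : Int) + 1)) < pvE n h := by
  have hcx1 : c + (x + 1) ≤ h.length := by omega
  have hdecomp : h = h.take c ++ List.replicate (x + 1) r ++ h.drop (c + (x + 1)) := by
    have hmid : (h.drop c).take (x + 1) = List.replicate (x + 1) r := by
      apply List.ext_getElem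
      · simp; omega
      · intro i hi1 hi2
        rw [List.getElem_take, List.getElem_drop, List.getElem_replicate]
        have hiw : i < x + 1 := by simpa using hi2
        exact hrun i (by omega)
    conv_lhs => rw [← List.take_append_drop c h]
    conv_lhs => rw [← List.take_append_drop (x + 1) (h.drop c)]
    rw [hmid, List.drop_drop, ← List.append_assoc]
  have hlt : (n - (r + (y : Int) + 1)).toNat < (n - r).toNat := by omega
  have hmul : (x + 1) * (n - (r + (y : Int) + 1)).toNat < (x + 1) * (n - r).toNat :=
    (Nat.mul_lt_mul_left (by omega)).mpr hlt
  calc pvE n (pvBump h c (x + 1) (r + (y : Int) + 1))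
      = pvE n (h.take c) + (x + 1) * (n - (r + (y : Int) + 1)).toNat +
          pvE n (h.drop (c + (x + 1))) := by
        simp [pvE, pvBump, List.sum_replicate, smul_eq_mul, Nat.add_assoc]
    _ < pvE n (h.take c) + (x + 1) * (n - r).toNat + pvE n (h.drop (c + (x + 1))) := by omega
    _ = pvE n h := by
        conv_rhs => rw [hdecomp]
        simp [pvE, List.sum_replicate, smul_eq_mul, Nat.add_assoc]

lemma pvStep (n m : Int) (hn : 1 ≤ n) (hm : 1 ≤ m) (matrix : List (List String))
    (h : List Int) (hinv : pvInv n m matrix h) (r : Int) (c w : Nat)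
    (hr0 : 0 ≤ r) (hrn : r < n) (hcw : c + w ≤ h.length)
    (hrun : ∀ (j : Nat) (hj : j < w), h[c + j]'(by omega) = r)
    (y x : Nat) (hy : (y : Int) < n - r) (hx : x < w) (fill : String) (hfill : fill ≠ "") :
    pvInv n m (pvFillMatrix n m (y : Int) (x : Int) r (c : Int) fill matrix)
      (pvBump h c (x + 1) (r + (y : Int) + 1)) ∧
    pvE n (pvBump h c (x + 1) (r + (y : Int) + 1)) < pvE n h := by
  obtain ⟨hml, hrowl, hhl, hhb, hcell⟩ := hinv
  have hcx1 : c + (x + 1) ≤ h.length := by omega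
  have hbl : (pvBump h c (x + 1) (r + (y : Int) + 1)).length = h.length :=
    pvBump_length h c (x + 1) _ hcx1
  constructor
  · refine ⟨?_, ?_, ?_, ?_, ?_⟩
    · simp [pvFillMatrix, PySem.List.length_pyRange_one]
    · intro row hrow
      simp only [pvFillMatrix, List.mem_map] at hrow
      obtain ⟨a, _, ha⟩ := hrow
      rw [← ha]
      simp [PySem.List.length_pyRange_one]
    · rw [hbl]; exact hhl
    · intro i hi
      rw [hbl] at hi
      rw [pvBump_getElem h c (x + 1) _ i hcx1 hi]
      split_ifs with hin
      · constructor <;> omega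
      · exact hhb i hi
    · intro ri ci h1 h2 h3
      have hril : ri < n.toNat := by
        simpa [pvFillMatrix, PySem.List.length_pyRange_one] using h1
      have hcil : ci < m.toNat := by
        have := h2
        simp only [pvFillMatrix] at this
        rw [List.getElem_map] at this
        simpa [PySem.List.length_pyRange_one] using this
      have hcih : ci < h.length := by rw [hbl] at h3; exact h3
      -- compute the fill-matrix entry
      have hentry : (((pvFillMatrix n m (y : Int) (x : Int) r (c : Int) fill matrix)[ri]'h1)[ci]'h2) =
          (if pvCell matrix (ri : Int) (ci : Int) ≠ "" then pvCell matrix (ri : Int) (ci : Int)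
           else if (c : Int) ≤ (ci : Int) ∧ r ≤ (ri : Int) ∧ (c : Int) + (x : Int) ≥ (ci : Int) ∧
               r + (y : Int) ≥ (ri : Int) then fill else "") := by
        simp only [pvFillMatrix, List.getElem_map, PySem.List.getElem_pyRange_one, zero_add]
      have hmat1 : ri < matrix.length := by omega
      have hmat2 : ci < (matrix[ri]'hmat1).length := by
        rw [hrowl _ (List.getElem_mem hmat1)]; omega
      have hcureq : pvCell matrix (ri : Int) (ci : Int) = (matrix[ri]'hmat1)[ci]'hmat2 := by
        have := pvCell_eq matrix (ri : Int) (ci : Int) (by omega) (by omega) (by omega)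
          (by simpa using hmat2)
        simpa using this
      have hcur := hcell ri ci hmat1 hmat2 hcih
      rw [hentry, hcureq]
      rw [pvBump_getElem h c (x + 1) _ ci hcx1 hcih]
      by_cases hcc : (matrix[ri]'hmat1)[ci]'hmat2 ≠ ""
      · rw [if_pos hcc]
        have hlt := hcur.mp hcc
        by_cases hin : c ≤ ci ∧ ci < c + (x + 1)
        · rw [if_pos hin]
          have hhci : h[ci]'hcih = r := by
            have := hrun (ci - c) (by omega)
            have heq : c + (ci - c) = ci := by omega
            simpa [heq] using this
          constructor
          · intro _; omega
          · intro _; exact hcc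
        · rw [if_neg hin]; exact hcur
      · rw [if_neg hcc]
        have hnlt : ¬ ((ri : Int) < h[ci]'hcih) := fun hl => hcc (hcur.mpr hl)
        by_cases hin : c ≤ ci ∧ ci < c + (x + 1)
        · rw [if_pos hin]
          have hhci : h[ci]'hcih = r := by
            have := hrun (ci - c) (by omega)
            have heq : c + (ci - c) = ci := by omega
            simpa [heq] using this
          by_cases hreg : (c : Int) ≤ (ci : Int) ∧ r ≤ (ri : Int) ∧
              (c : Int) + (x : Int) ≥ (ci : Int) ∧ r + (y : Int) ≥ (ri : Int)
          · rw [if_pos hreg]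
            constructor
            · intro _; omega
            · intro _; exact hfill
          · rw [if_neg hreg]
            constructor
            · intro hcontr; exact absurd rfl hcontr
            · intro hlt
              exfalso
              exact hreg ⟨by omega, by omega, by omega, by omega⟩
        · rw [if_neg hin]
          have hreg : ¬ ((c : Int) ≤ (ci : Int) ∧ r ≤ (ri : Int) ∧
              (c : Int) + (x : Int) ≥ (ci : Int) ∧ r + (y : Int) ≥ (ri : Int)) := by omega
          rw [if_neg hreg]
          constructor
          · intro hcontr; exact absurd rfl hcontr
          · intro hlt; exact absurd hlt hnlt
  · -- the empty-cell count drops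
    exact pvEBump n h r c w hrn hcw hrun y x hy hx

lemma pvRunFacts (h : List Int) (r : Int) (c : Nat) (hc : c < h.length)
    (hcr : h[c]'hc = r) (hmin : ∀ (i : Nat) (hi : i < h.length), r ≤ h[i]) :
    c + (1 + ((h.drop (c + 1)).takeWhile (fun v => v == r)).length) ≤ h.length ∧
    (∀ (j : Nat) (hj : c + j < h.length),
      j < 1 + ((h.drop (c + 1)).takeWhile (fun v => v == r)).length → h[c + j]'hj = r) ∧
    (∀ (hlt : c + (1 + ((h.drop (c + 1)).takeWhile (fun v => v == r)).length) < h.length),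
      r < h[c + (1 + ((h.drop (c + 1)).takeWhile (fun v => v == r)).length)]'hlt) := by
  have htlen : ((h.drop (c + 1)).takeWhile (fun v => v == r)).length ≤ h.length - (c + 1) := by
    have h1 := (List.takeWhile_prefix (l := h.drop (c + 1)) (fun v => v == r)).length_le
    simpa using h1
  refine ⟨by omega, ?_, ?_⟩
  · intro j hj hjw
    match j with
    | 0 => simpa using hcr
    | j' + 1 =>
      have hj' : j' < ((h.drop (c + 1)).takeWhile (fun v => v == r)).length := by omega
      have hmem : ((h.drop (c + 1)).takeWhile (fun v => v == r))[j']'hj' ∈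
          (h.drop (c + 1)).takeWhile (fun v => v == r) := List.getElem_mem hj'
      have h2 := List.mem_takeWhile_imp hmem
      have h1 := pvTakeWhile_getElem (h.drop (c + 1)) (fun v => v == r) j' hj'
      rw [List.getElem_drop] at h1
      have h4 : ((h.drop (c + 1)).takeWhile (fun v => v == r))[j']'hj' = r := by simpa using h2
      have h5 : h[c + (j' + 1)]'hj = h[c + 1 + j']'(by omega) := by congr 1; omega
      rw [h5, h1, h4]
  · intro hlt
    have htl : ((h.drop (c + 1)).takeWhile (fun v => v == r)).length <
        (h.drop (c + 1)).length := by simp; omega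
    have hstop := pvTakeWhile_stop (h.drop (c + 1)) (fun v => v == r) htl
    rw [List.getElem_drop] at hstop
    have hne2 : (h[c + 1 + ((h.drop (c + 1)).takeWhile (fun v => v == r)).length]'(by omega)) ≠ r := by
      intro hcontr
      rw [hcontr] at hstop
      simp at hstop
    have hge := hmin (c + (1 + ((h.drop (c + 1)).takeWhile (fun v => v == r)).length)) (by omega)
    have h6 : h[c + (1 + ((h.drop (c + 1)).takeWhile (fun v => v == r)).length)]'hlt =
        h[c + 1 + ((h.drop (c + 1)).takeWhile (fun v => v == r)).length]'(by omega) := by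
      congr 1; omega
    rw [h6] at hge ⊢
    omega

lemma pvFillStr_ne (alph : List Char) (k : Int) : pvFillStr alph k ≠ "" := by
  unfold pvFillStr
  cases hg : PySem.List.pyGet? alph (k - 1) with
  | none =>
    intro hcontr
    have := congrArg String.toList hcontr
    simp at this
  | some ch =>
    intro hcontr
    have := congrArg String.toList hcontr
    simp at this

lemma pvMain (alph : List Char) (n m : Int) (hn : 1 ≤ n) (hm : 1 ≤ m) :
    ∀ (fuel : Nat) (k : Int) (matrix : List (List String)) (h : List Int), 0 ≤ k →
      pvInv n m matrix h → pvE n h < fuel →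
      pvSearchA alph n m fuel k matrix = pvSearchB n k.toNat h := by
  intro fuel
  induction fuel with
  | zero => intro k matrix h _ _ hf; omega
  | succ fuel ih =>
    intro k matrix h hk hinv hfuel
    have hhl : h.length = m.toNat := hinv.2.2.1
    have hhb := hinv.2.2.2.1
    have hne : h ≠ [] := by
      intro h0; rw [h0] at hhl; simp at hhl; omega
    obtain ⟨m0, eqmin⟩ : ∃ m0, PySem.List.min? h (fun v => v) = some m0 := by
      cases eq : PySem.List.min? h (fun v => v) with
      | none => exact absurd ((PySem.List.min?_eq_none_iff _ _).mp eq) hne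
      | some m0 => exact ⟨m0, rfl⟩
    have hrmem : m0 ∈ h := PySem.List.min?_mem eqmin
    have hrminmem : ∀ v ∈ h, m0 ≤ v := by
      intro v hv
      exact PySem.List.min?_isMin eqmin v hv
    have hrmin : ∀ (i : Nat) (hi : i < h.length), m0 ≤ h[i] := by
      intro i hi; exact hrminmem _ (List.getElem_mem hi)
    obtain ⟨j0, hj0, hj0v⟩ := List.getElem_of_mem hrmem
    have hr0 : 0 ≤ m0 := by have := (hhb j0 hj0).1; omega
    have hrn : m0 ≤ n := by have := (hhb j0 hj0).2; omega
    by_cases hfull : m0 = n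
    · -- grid full: both sides return 1
      have hA : pvFirstEmpty n m matrix = none := by
        apply pvFE_none n m matrix h hinv
        intro i hi
        have h1 := hrmin i hi
        have h2 := (hhb i hi).2
        omega
      rw [pvSearchA, hA]
      simp [pvSearchB.eq_def, eqmin, hfull]
    · have hrn' : m0 < n := by omega
      obtain ⟨c, eqc⟩ : ∃ c, PySem.List.index? h m0 = some c := by
        cases eq : PySem.List.index? h m0 with
        | none => exact absurd ((PySem.List.index?_eq_none_iff _ _).mp eq) (by simp; exact hrmem)
        | some c => exact ⟨c, rfl⟩
      obtain ⟨hc, hcr, hbef⟩ := PySem.List.getElem_of_index?_eq_some eqc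
      obtain ⟨hcw, hrunF, hstopF⟩ := pvRunFacts h m0 c hc hcr hrmin
      set w : Nat := 1 + ((h.drop (c + 1)).takeWhile (fun v => v == m0)).length with hw
      -- the first empty point
      have hFE : pvFirstEmpty n m matrix = some (m0, (c : Int)) :=
        pvFE_some n m matrix h hinv m0 c hrmin hc hcr hbef hr0 hrn'
      by_cases hk0 : k = 0
      · rw [pvSearchA, hFE]
        subst hk0
        simp [pvSearchB.eq_def, eqmin, hfull]
      · -- k ≥ 1: both sides sum over all rectangles at the anchor
        have hk1 : 1 ≤ k := by omega
        have hkt : k.toNat = (k - 1).toNat + 1 := by omega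
        have hwm : (c : Int) + (w : Int) ≤ m := by omega
        -- occupancy of cells tested by the inner loop
        have hoccF : ∀ (yv xv : Int), 0 ≤ yv → yv < n - m0 → 0 ≤ xv → xv < (w : Int) →
            ((pvCell matrix (yv + m0) (xv + (c : Int)) != "") = false) := by
          intro yv xv hy0 hy1 hx0 hx1
          have h4 : (xv + (c : Int)).toNat < h.length := by omega
          have hiff := pvCell_iff n m matrix h hinv (yv + m0) (xv + (c : Int))
            (by omega) (by omega) (by omega) (by omega) h4
          have hval : h[(xv + (c : Int)).toNat]'h4 = m0 := by
            have heq : (xv + (c : Int)).toNat = c + xv.toNat := by omega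
            have hv := hrunF xv.toNat (by omega) (by omega)
            have h5 : h[(xv + (c : Int)).toNat]'h4 = h[c + xv.toNat]'(by omega) := by
              congr 1
            exact h5.trans hv
          have hcellv : pvCell matrix (yv + m0) (xv + (c : Int)) = "" := by
            by_contra hne2
            have := hiff.mp hne2
            rw [hval] at this
            omega
          simp [hcellv]
        have hoccT : c + w < h.length →
            ((pvCell matrix ((0 : Int) + m0) ((w : Int) + (c : Int)) != "") = true) := by
          intro hlt
          have h4 : ((w : Int) + (c : Int)).toNat < h.length := by omega
          have hiff := pvCell_iff n m matrix h hinv ((0 : Int) + m0) ((w : Int) + (c : Int))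
            (by omega) (by omega) (by omega) (by omega) h4
          have hval : m0 < h[((w : Int) + (c : Int)).toNat]'h4 := by
            have hv := hstopF (by omega)
            have h5 : h[((w : Int) + (c : Int)).toNat]'h4 = h[c + w]'(by omega) := by
              congr 1; omega
            rw [h5]
            exact hv
          have : pvCell matrix ((0 : Int) + m0) ((w : Int) + (c : Int)) ≠ "" := by
            apply hiff.mpr
            omega
          simpa using this
        -- evaluate A's nested loops to a double sum over heights/widths
        have hAval : pvSearchA alph n m (fuel + 1) k matrix =
            ((PySem.List.pyRange 0 (n - m0) 1).map (fun yv =>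
              ((PySem.List.pyRange 0 (w : Int) 1).map (fun xv =>
                pvSearchA alph n m fuel (k - 1)
                  (pvFillMatrix n m yv xv m0 (c : Int) (pvFillStr alph k) matrix))).sum)).sum := by
          rw [pvSearchA, hFE]
          simp only [hk0, if_false]
          have hy0mem : (0 : Int) < n - m0 := by omega
          rw [PySem.List.pyRange_one_cons hy0mem, List.foldl_cons]
          -- the y = 0 iteration: the inner loop runs exactly w steps
          have hxres : pvXLoop
              (fun x => pvSearchA alph n m fuel (k - 1)
                (pvFillMatrix n m 0 x m0 (c : Int) (pvFillStr alph k) matrix))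
              (fun x => pvCell matrix (0 + m0) (x + (c : Int)) != "")
              (PySem.List.pyRange 0 (m - (c : Int)) 1) =
              (if (c : Int) + (w : Int) = m then none else some (w : Int),
               ((PySem.List.pyRange 0 (w : Int) 1).map (fun xv =>
                 pvSearchA alph n m fuel (k - 1)
                   (pvFillMatrix n m 0 xv m0 (c : Int) (pvFillStr alph k) matrix))).sum) := by
            by_cases hsplit : (c : Int) + (w : Int) = m
            · rw [if_pos hsplit]
              have hlist : m - (c : Int) = (w : Int) := by omega
              rw [hlist]
              rw [pvXLoop_all]
              intro x hx
              rw [PySem.List.mem_pyRange_one] at hx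
              exact hoccF 0 x (by omega) hy0mem hx.1 hx.2
            · rw [if_neg hsplit]
              have hltw : (w : Int) < m - (c : Int) := by omega
              rw [PySem.List.pyRange_one_append 0 ((w : Int)) (m - (c : Int)) (by omega) (by omega)]
              rw [PySem.List.pyRange_one_cons hltw]
              rw [pvXLoop_break]
              · intro x hx
                rw [PySem.List.mem_pyRange_one] at hx
                exact hoccF 0 x (by omega) hy0mem hx.1 hx.2
              · exact hoccT (by omega)
          -- fold in the remaining rows, whose inner loop always runs w steps
          simp only []
          rw [hxres]
          have hstate : ((if (c : Int) + (w : Int) = m then none else some ((w : Int)) :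
              Option Int).getD (m - (c : Int))) = (w : Int) := by
            split_ifs with hs
            · simp; omega
            · simp
          rw [hstate]
          rw [pvFoldPair _ _ _ (fun yv =>
              ((PySem.List.pyRange 0 (w : Int) 1).map (fun xv =>
                pvSearchA alph n m fuel (k - 1)
                  (pvFillMatrix n m yv xv m0 (c : Int) (pvFillStr alph k) matrix))).sum)]
          · simp
          · intro a yv hyv
            rw [PySem.List.mem_pyRange_one] at hyv
            simp only []
            rw [pvXLoop_all]
            · simp
            · intro x hx
              rw [PySem.List.mem_pyRange_one] at hx
              exact hoccF yv x (by omega) (by omega) hx.1 hx.2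
        -- evaluate B's nested loops to the matching double sum
        have hBval : pvSearchB n k.toNat h =
            ((PySem.List.pyRange 1 (n - m0 + 1) 1).map (fun dy =>
              ((PySem.List.pyRange 1 ((w : Int) + 1) 1).map (fun dx =>
                pvSearchB n (k - 1).toNat
                  (PySem.List.slice h none (some (c : Int)) ++
                   PySem.List.pyRepeat [m0 + dy] dx ++
                   PySem.List.slice h (some ((c : Int) + dx)) none))).sum)).sum := by
          conv_lhs => rw [hkt]
          rw [pvSearchB.eq_def]
          simp only [eqmin, Option.getD_some, if_neg hfull, eqc]
          rw [← hw]
          simp only [PySem.List.foldl_add]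
          simp
        rw [hAval, hBval]
        have h0 : PySem.List.pyRange 0 (n - m0) 1 =
            (List.range (n - m0).toNat).map (fun (kk : Nat) => (0 : Int) + (kk : Int)) := by
          rw [PySem.List.pyRange_one, Int.sub_zero]
        have h1 : PySem.List.pyRange 1 (n - m0 + 1) 1 =
            (List.range (n - m0).toNat).map (fun (kk : Nat) => (1 : Int) + (kk : Int)) := by
          rw [PySem.List.pyRange_one, Int.add_sub_cancel]
        have h2 : PySem.List.pyRange 0 ((w : Int)) 1 =
            (List.range w).map (fun (kk : Nat) => (0 : Int) + (kk : Int)) := by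
          rw [PySem.List.pyRange_one, Int.sub_zero, Int.toNat_natCast]
        have h3 : PySem.List.pyRange 1 ((w : Int) + 1) 1 =
            (List.range w).map (fun (kk : Nat) => (1 : Int) + (kk : Int)) := by
          rw [PySem.List.pyRange_one, Int.add_sub_cancel, Int.toNat_natCast]
        rw [h0, h1, h2, h3]
        simp only [List.map_map]
        refine congrArg List.sum (List.map_congr_left ?_)
        intro yj hyj
        rw [List.mem_range] at hyj
        refine congrArg List.sum (List.map_congr_left ?_)
        intro xj hxj
        rw [List.mem_range] at hxj
        simp only [Function.comp_apply, zero_add]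
        have hbump2 : PySem.List.slice h none (some (c : Int)) ++
            PySem.List.pyRepeat [m0 + ((1 : Int) + (yj : Int))] ((1 : Int) + (xj : Int)) ++
            PySem.List.slice h (some ((c : Int) + ((1 : Int) + (xj : Int)))) none =
            pvBump h c (xj + 1) (m0 + (yj : Int) + 1) := by
          rw [pvBump]
          rw [PySem.List.slice_to_natCast]
          rw [PySem.List.pyRepeat_singleton]
          rw [PySem.List.slice_from h (a := (c : Int) + ((1 : Int) + (xj : Int))) (by omega)]
          congr 2
          · congr 1
            · omega
            · ring
          · omega
        rw [hbump2]
        obtain ⟨hinv2, hE2⟩ := pvStep n m hn hm matrix h hinv m0 c w hr0 hrn' hcw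
          (fun j hj => hrunF j (by omega) hj) yj xj (by omega) hxj
          (pvFillStr alph k) (pvFillStr_ne alph k)
        exact ih (k - 1) _ _ (by omega) hinv2 (by omega)

-- proof-side skyline count with no rectangle budget: what A computes when k is negative
-- (the k == 0 guard can then never fire)
def pvSearchInf (n : Int) : Nat → List Int → Int
  | fuel, h =>
    let r := (PySem.List.min? h (fun v => v)).getD 0
    if r = n then 1
    else
      match fuel with
      | 0 => 0
      | fuel' + 1 =>
        let c : Nat := (PySem.List.index? h r).getD 0
        let w : Nat := 1 + ((h.drop (c + 1)).takeWhile (fun v => v == r)).length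
        ((PySem.List.pyRange 0 (n - r) 1).map (fun yv =>
          ((PySem.List.pyRange 0 (w : Int) 1).map (fun xv =>
            pvSearchInf n fuel' (pvBump h c (xv.toNat + 1) (r + yv + 1)))).sum)).sum

lemma pvMainNeg (alph : List Char) (n m : Int) (hn : 1 ≤ n) (hm : 1 ≤ m) :
    ∀ (fuel : Nat) (k : Int) (matrix : List (List String)) (h : List Int), k < 0 →
      pvInv n m matrix h → pvE n h < fuel →
      pvSearchA alph n m fuel k matrix = pvSearchInf n fuel h := by
  intro fuel
  induction fuel with
  | zero => intro k matrix h _ _ hf; omega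
  | succ fuel ih =>
    intro k matrix h hk hinv hfuel
    have hhl : h.length = m.toNat := hinv.2.2.1
    have hhb := hinv.2.2.2.1
    have hne : h ≠ [] := by
      intro h0; rw [h0] at hhl; simp at hhl; omega
    obtain ⟨m0, eqmin⟩ : ∃ m0, PySem.List.min? h (fun v => v) = some m0 := by
      cases eq : PySem.List.min? h (fun v => v) with
      | none => exact absurd ((PySem.List.min?_eq_none_iff _ _).mp eq) hne
      | some m0 => exact ⟨m0, rfl⟩
    have hrmem : m0 ∈ h := PySem.List.min?_mem eqmin
    have hrmin : ∀ (i : Nat) (hi : i < h.length), m0 ≤ h[i] := by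
      intro i hi; exact PySem.List.min?_isMin eqmin _ (List.getElem_mem hi)
    obtain ⟨j0, hj0, hj0v⟩ := List.getElem_of_mem hrmem
    have hr0 : 0 ≤ m0 := by have := (hhb j0 hj0).1; omega
    have hrn : m0 ≤ n := by have := (hhb j0 hj0).2; omega
    by_cases hfull : m0 = n
    · have hA : pvFirstEmpty n m matrix = none := by
        apply pvFE_none n m matrix h hinv
        intro i hi
        have h1 := hrmin i hi
        have h2 := (hhb i hi).2
        omega
      rw [pvSearchA, hA]
      rw [pvSearchInf.eq_def]
      simp [eqmin, hfull]
    · have hrn' : m0 < n := by omega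
      obtain ⟨c, eqc⟩ : ∃ c, PySem.List.index? h m0 = some c := by
        cases eq : PySem.List.index? h m0 with
        | none => exact absurd ((PySem.List.index?_eq_none_iff _ _).mp eq) (by simp; exact hrmem)
        | some c => exact ⟨c, rfl⟩
      obtain ⟨hc, hcr, hbef⟩ := PySem.List.getElem_of_index?_eq_some eqc
      obtain ⟨hcw, hrunF, hstopF⟩ := pvRunFacts h m0 c hc hcr hrmin
      set w : Nat := 1 + ((h.drop (c + 1)).takeWhile (fun v => v == m0)).length with hw
      have hFE : pvFirstEmpty n m matrix = some (m0, (c : Int)) :=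
        pvFE_some n m matrix h hinv m0 c hrmin hc hcr hbef hr0 hrn'
      have hk0 : ¬ k = 0 := by omega
      have hwm : (c : Int) + (w : Int) ≤ m := by omega
      have hoccF : ∀ (yv xv : Int), 0 ≤ yv → yv < n - m0 → 0 ≤ xv → xv < (w : Int) →
          ((pvCell matrix (yv + m0) (xv + (c : Int)) != "") = false) := by
        intro yv xv hy0 hy1 hx0 hx1
        have h4 : (xv + (c : Int)).toNat < h.length := by omega
        have hiff := pvCell_iff n m matrix h hinv (yv + m0) (xv + (c : Int))
          (by omega) (by omega) (by omega) (by omega) h4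
        have hval : h[(xv + (c : Int)).toNat]'h4 = m0 := by
          have heq : (xv + (c : Int)).toNat = c + xv.toNat := by omega
          have hv := hrunF xv.toNat (by omega) (by omega)
          have h5 : h[(xv + (c : Int)).toNat]'h4 = h[c + xv.toNat]'(by omega) := by
            congr 1
          exact h5.trans hv
        have hcellv : pvCell matrix (yv + m0) (xv + (c : Int)) = "" := by
          by_contra hne2
          have := hiff.mp hne2
          rw [hval] at this
          omega
        simp [hcellv]
      have hoccT : c + w < h.length →
          ((pvCell matrix ((0 : Int) + m0) ((w : Int) + (c : Int)) != "") = true) := by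
        intro hlt
        have h4 : ((w : Int) + (c : Int)).toNat < h.length := by omega
        have hiff := pvCell_iff n m matrix h hinv ((0 : Int) + m0) ((w : Int) + (c : Int))
          (by omega) (by omega) (by omega) (by omega) h4
        have hval : m0 < h[((w : Int) + (c : Int)).toNat]'h4 := by
          have hv := hstopF (by omega)
          have h5 : h[((w : Int) + (c : Int)).toNat]'h4 = h[c + w]'(by omega) := by
            congr 1; omega
          rw [h5]
          exact hv
        have : pvCell matrix ((0 : Int) + m0) ((w : Int) + (c : Int)) ≠ "" := by
          apply hiff.mpr
          omega
        simpa using this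
      have hAval : pvSearchA alph n m (fuel + 1) k matrix =
          ((PySem.List.pyRange 0 (n - m0) 1).map (fun yv =>
            ((PySem.List.pyRange 0 (w : Int) 1).map (fun xv =>
              pvSearchA alph n m fuel (k - 1)
                (pvFillMatrix n m yv xv m0 (c : Int) (pvFillStr alph k) matrix))).sum)).sum := by
        rw [pvSearchA, hFE]
        simp only [hk0, if_false]
        have hy0mem : (0 : Int) < n - m0 := by omega
        rw [PySem.List.pyRange_one_cons hy0mem, List.foldl_cons]
        have hxres : pvXLoop
            (fun x => pvSearchA alph n m fuel (k - 1)
              (pvFillMatrix n m 0 x m0 (c : Int) (pvFillStr alph k) matrix))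
            (fun x => pvCell matrix (0 + m0) (x + (c : Int)) != "")
            (PySem.List.pyRange 0 (m - (c : Int)) 1) =
            (if (c : Int) + (w : Int) = m then none else some (w : Int),
             ((PySem.List.pyRange 0 (w : Int) 1).map (fun xv =>
               pvSearchA alph n m fuel (k - 1)
                 (pvFillMatrix n m 0 xv m0 (c : Int) (pvFillStr alph k) matrix))).sum) := by
          by_cases hsplit : (c : Int) + (w : Int) = m
          · rw [if_pos hsplit]
            have hlist : m - (c : Int) = (w : Int) := by omega
            rw [hlist]
            rw [pvXLoop_all]
            intro x hx
            rw [PySem.List.mem_pyRange_one] at hx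
            exact hoccF 0 x (by omega) hy0mem hx.1 hx.2
          · rw [if_neg hsplit]
            have hltw : (w : Int) < m - (c : Int) := by omega
            rw [PySem.List.pyRange_one_append 0 ((w : Int)) (m - (c : Int)) (by omega) (by omega)]
            rw [PySem.List.pyRange_one_cons hltw]
            rw [pvXLoop_break]
            · intro x hx
              rw [PySem.List.mem_pyRange_one] at hx
              exact hoccF 0 x (by omega) hy0mem hx.1 hx.2
            · exact hoccT (by omega)
        simp only []
        rw [hxres]
        have hstate : ((if (c : Int) + (w : Int) = m then none else some ((w : Int)) :
            Option Int).getD (m - (c : Int))) = (w : Int) := by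
          split_ifs with hs
          · simp; omega
          · simp
        rw [hstate]
        rw [pvFoldPair _ _ _ (fun yv =>
            ((PySem.List.pyRange 0 (w : Int) 1).map (fun xv =>
              pvSearchA alph n m fuel (k - 1)
                (pvFillMatrix n m yv xv m0 (c : Int) (pvFillStr alph k) matrix))).sum)]
        · simp
        · intro a yv hyv
          rw [PySem.List.mem_pyRange_one] at hyv
          simp only []
          rw [pvXLoop_all]
          · simp
          · intro x hx
            rw [PySem.List.mem_pyRange_one] at hx
            exact hoccF yv x (by omega) (by omega) hx.1 hx.2
      rw [hAval]
      rw [pvSearchInf.eq_def]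
      simp only [eqmin, Option.getD_some, if_neg hfull, eqc, ← hw]
      refine congrArg List.sum (List.map_congr_left ?_)
      intro yv hyv
      rw [PySem.List.mem_pyRange_one] at hyv
      refine congrArg List.sum (List.map_congr_left ?_)
      intro xv hxv
      rw [PySem.List.mem_pyRange_one] at hxv
      have hyc : ((yv.toNat : Int)) = yv := Int.toNat_of_nonneg hyv.1
      have hxc : ((xv.toNat : Int)) = xv := Int.toNat_of_nonneg hxv.1
      rw [← hyc, ← hxc]
      simp only [Int.toNat_natCast]
      obtain ⟨hinv2, hE2⟩ := pvStep n m hn hm matrix h hinv m0 c w hr0 hrn' hcw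
        (fun j hj => hrunF j (by omega) hj) yv.toNat xv.toNat (by omega) (by omega)
        (pvFillStr alph k) (pvFillStr_ne alph k)
      exact ih (k - 1) _ _ (by omega) hinv2 (by omega)

lemma pvInfNonneg (n : Int) : ∀ (fuel : Nat) (h : List Int), 0 ≤ pvSearchInf n fuel h := by
  intro fuel
  induction fuel with
  | zero =>
    intro h
    rw [pvSearchInf.eq_def]
    dsimp only
    split_ifs <;> simp
  | succ fuel ih =>
    intro h
    rw [pvSearchInf.eq_def]
    dsimp only
    split_ifs with hf
    · omega
    · apply List.sum_nonneg
      intro a ha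
      simp only [List.mem_map] at ha
      obtain ⟨yv, _, rfl⟩ := ha
      apply List.sum_nonneg
      intro b hb
      simp only [List.mem_map] at hb
      obtain ⟨xv, _, rfl⟩ := hb
      exact ih _

lemma pvInfPos (n m : Int) (hn : 1 ≤ n) (hm : 1 ≤ m) : ∀ (fuel : Nat) (h : List Int),
    h.length = m.toNat → (∀ (i : Nat) (hi : i < h.length), 0 ≤ h[i] ∧ h[i] ≤ n) →
    pvE n h < fuel → 1 ≤ pvSearchInf n fuel h := by
  intro fuel
  induction fuel with
  | zero => intro h _ _ hf; omega
  | succ fuel ih =>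
    intro h hhl hhb hfuel
    have hne : h ≠ [] := by
      intro h0; rw [h0] at hhl; simp at hhl; omega
    obtain ⟨m0, eqmin⟩ : ∃ m0, PySem.List.min? h (fun v => v) = some m0 := by
      cases eq : PySem.List.min? h (fun v => v) with
      | none => exact absurd ((PySem.List.min?_eq_none_iff _ _).mp eq) hne
      | some m0 => exact ⟨m0, rfl⟩
    have hrmem : m0 ∈ h := PySem.List.min?_mem eqmin
    have hrmin : ∀ (i : Nat) (hi : i < h.length), m0 ≤ h[i] := by
      intro i hi; exact PySem.List.min?_isMin eqmin _ (List.getElem_mem hi)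
    obtain ⟨j0, hj0, hj0v⟩ := List.getElem_of_mem hrmem
    have hr0 : 0 ≤ m0 := by have := (hhb j0 hj0).1; omega
    have hrn : m0 ≤ n := by have := (hhb j0 hj0).2; omega
    by_cases hfull : m0 = n
    · rw [pvSearchInf.eq_def]
      simp [eqmin, hfull]
    · have hrn' : m0 < n := by omega
      obtain ⟨c, eqc⟩ : ∃ c, PySem.List.index? h m0 = some c := by
        cases eq : PySem.List.index? h m0 with
        | none => exact absurd ((PySem.List.index?_eq_none_iff _ _).mp eq) (by simp; exact hrmem)
        | some c => exact ⟨c, rfl⟩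
      obtain ⟨hc, hcr, hbef⟩ := PySem.List.getElem_of_index?_eq_some eqc
      obtain ⟨hcw, hrunF, hstopF⟩ := pvRunFacts h m0 c hc hcr hrmin
      set w : Nat := 1 + ((h.drop (c + 1)).takeWhile (fun v => v == m0)).length with hw
      rw [pvSearchInf.eq_def]
      simp only [eqmin, Option.getD_some, if_neg hfull, eqc, ← hw]
      rw [PySem.List.pyRange_one_cons (by omega : (0 : Int) < n - m0), List.map_cons,
        List.sum_cons]
      rw [PySem.List.pyRange_one_cons (by omega : (0 : Int) < (w : Int)), List.map_cons,
        List.sum_cons]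
      have hT : 1 ≤ pvSearchInf n fuel (pvBump h c ((0 : Int).toNat + 1) (m0 + 0 + 1)) := by
        have hE2 : pvE n (pvBump h c (0 + 1) (m0 + ((0 : Nat) : Int) + 1)) < pvE n h :=
          pvEBump n h m0 c w hrn' hcw (fun j hj => hrunF j (by omega) hj) 0 0
            (by simpa using (by omega : (0 : Int) < n - m0)) (by omega)
        apply ih
        · rw [pvBump_length h c _ _ (by omega)]; exact hhl
        · intro i hi
          rw [pvBump_length h c _ _ (by omega)] at hi
          rw [pvBump_getElem h c _ _ i (by omega) hi]
          split_ifs with hin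
          · constructor <;> omega
          · exact hhb i hi
        · have he : ((0 : Int).toNat + 1) = 0 + 1 := rfl
          have he2 : m0 + 0 + 1 = m0 + ((0 : Nat) : Int) + 1 := by norm_num
          rw [he, he2]
          omega
      have hS1 : 0 ≤ ((PySem.List.pyRange (0 + 1) (w : Int) 1).map (fun xv =>
          pvSearchInf n fuel (pvBump h c (xv.toNat + 1) (m0 + 0 + 1)))).sum := by
        apply List.sum_nonneg
        intro b hb
        simp only [List.mem_map] at hb
        obtain ⟨xv, _, rfl⟩ := hb
        exact pvInfNonneg n fuel _
      have hS2 : 0 ≤ ((PySem.List.pyRange (0 + 1) (n - m0) 1).map (fun yv =>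
          (((0 : Int) :: PySem.List.pyRange (0 + 1) (w : Int) 1).map (fun xv =>
            pvSearchInf n fuel (pvBump h c (xv.toNat + 1) (m0 + yv + 1)))).sum)).sum := by
        apply List.sum_nonneg
        intro a ha
        simp only [List.mem_map] at ha
        obtain ⟨yv, _, rfl⟩ := ha
        apply List.sum_nonneg
        intro b hb
        simp only [List.mem_map] at hb
        obtain ⟨xv, _, rfl⟩ := hb
        exact pvInfNonneg n fuel _
      omega

lemma pvMinRepl : ∀ (j : Nat), List.foldl min (0 : Int) (List.replicate j 0) = 0 := by
  intro j
  induction j with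
  | zero => simp
  | succ j ih => simpa [List.replicate_succ] using ih

lemma pvInitInv (n m : Int) (hn : 1 ≤ n) (hm : 1 ≤ m) :
    pvInv n m ((PySem.List.pyRange 0 n 1).map (fun _ =>
      (PySem.List.pyRange 0 m 1).map (fun _ => "")))
      (List.replicate m.toNat 0) := by
  refine ⟨?_, ?_, ?_, ?_, ?_⟩
  · simp [PySem.List.length_pyRange_one]
  · intro row hrow
    simp only [List.mem_map] at hrow
    obtain ⟨a, _, ha⟩ := hrow
    rw [← ha]
    simp [PySem.List.length_pyRange_one]
  · simp
  · intro i hi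
    simp
    omega
  · intro ri ci h1 h2 h3
    have : ((((PySem.List.pyRange 0 n 1).map (fun _ =>
        (PySem.List.pyRange 0 m 1).map (fun _ => ("" : String))))[ri]'h1)[ci]'h2) = "" := by
      simp [List.getElem_map]
    rw [this]
    simp

-- ===== VERDICT (by name: the statement is the Claim_ definition above) =====
theorem count_spec : Claim_unchanged_count := by
  intro n m k hdom hpre
  unfold Spec_count
  intro hnd
  unfold count count_alt
  by_cases hgrid : n ≤ 0 ∨ m ≤ 0
  · rw [if_pos hgrid]
    have hFE : pvFirstEmpty n m ((PySem.List.pyRange 0 n 1).map (fun _ =>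
        (PySem.List.pyRange 0 m 1).map (fun _ => ""))) = none := by
      unfold pvFirstEmpty
      apply List.findSome?_eq_none_iff.mpr
      intro row hrow
      rcases hgrid with hg | hg
      · rw [PySem.List.pyRange_one_eq_nil hg] at hrow
        simp at hrow
      · rw [PySem.List.pyRange_one_eq_nil hg]
        simp
    simp only []
    rw [pvSearchA, hFE]
  · push Not at hgrid
    rw [if_neg (by omega)]
    have hn : 1 ≤ n := by omega
    have hm : 1 ≤ m := by omega
    have hk : 0 ≤ k := by
      unfold Pre_count at hpre
      unfold D_count at hnd
      omega
    simp only []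
    apply pvMain _ n m hn hm _ k _ _ hk (pvInitInv n m hn hm)
    have hE : pvE n (List.replicate m.toNat 0) = m.toNat * n.toNat := by
      simp [pvE, List.sum_replicate, smul_eq_mul]
    rw [hE]
    have := Nat.mul_comm m.toNat n.toNat
    omega

theorem count_changed : Claim_changed_count := by
  unfold Claim_changed_count; decide

theorem count_tight : Claim_exact_count := by
  intro n m k hdom hpre hd
  unfold D_count at hd
  obtain ⟨hn, hm, hkneg, _⟩ := hd
  have hB : count_alt n m k = 0 := by
    unfold count_alt
    rw [if_neg (by omega)]
    have hkt : k.toNat = 0 := by omega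
    rw [hkt, pvSearchB.eq_def]
    have hmrep : PySem.List.min? (List.replicate m.toNat (0 : Int)) (fun v => v) = some 0 := by
      obtain ⟨j, hj⟩ : ∃ j, m.toNat = j + 1 := ⟨m.toNat - 1, by omega⟩
      rw [hj, List.replicate_succ, PySem.List.min?_id_cons, pvMinRepl]
    simp [hmrep]
    omega
  have hA : 1 ≤ count n m k := by
    unfold count
    simp only []
    rw [pvMainNeg (pvAlph k) n m hn hm _ k _ (List.replicate m.toNat 0) hkneg
      (pvInitInv n m hn hm) (by
        have hE : pvE n (List.replicate m.toNat 0) = m.toNat * n.toNat := by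
          simp [pvE, List.sum_replicate, smul_eq_mul]
        rw [hE]
        have := Nat.mul_comm m.toNat n.toNat
        omega)]
    apply pvInfPos n m hn hm
    · simp
    · intro i hi
      simp
      omega
    · have hE : pvE n (List.replicate m.toNat 0) = m.toNat * n.toNat := by
        simp [pvE, List.sum_replicate, smul_eq_mul]
      rw [hE]
      have := Nat.mul_comm m.toNat n.toNat
      omega
  rw [hB]
  omega
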